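-- pv_equiv track=rewrite | github.com/tharunm490/Smart-Cooking-Assistant | backend/recipe_generator.py | _query_features
-- ===== SOURCE A (Python) =====
-- DISH_TYPES = {"dosa", "rice", "sambar", "halwa", "pulao", "bath", "curry", "kheer", "upma"}
--
-- MAJOR_INGREDIENTS = {"tomato", "spinach", "palak", "carrot", "onion", "potato", "paneer", "chicken", "dal"}
--
-- GENERIC_QUERY_TOKENS = {
--     "recipe", "dish", "food", "bath", "rice", "dosa", "sambar", "halwa",
--     "i", "want", "make", "cook", "prepare", "how", "to", "please", "show", "me",
-- }
--
-- def _query_features(query: str) -> tuple[str, str]: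
--     if not query:
--         return "", ""
--
--     tokens = [token for token in query.split() if token]
--     dish_type = next((token for token in tokens if token in DISH_TYPES), "")
--     main_keyword = next(
--         (
--             token for token in tokens
--             if token in MAJOR_INGREDIENTS or (token not in DISH_TYPES and token not in GENERIC_QUERY_TOKENS and len(token) > 2)
--         ),
--         "",
--     )
--     return dish_type, main_keyword
-- ===== SOURCE B (Python) =====
-- DISH_TYPES = {"dosa", "rice", "sambar", "halwa", "pulao", "bath", "curry", "kheer", "upma"}
--
-- MAJOR_INGREDIENTS = {"tomato", "spinach", "palak", "carrot", "onion", "potato", "paneer", "chicken", "dal"}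
--
-- GENERIC_QUERY_TOKENS = {
--     "recipe", "dish", "food", "bath", "rice", "dosa", "sambar", "halwa",
--     "i", "want", "make", "cook", "prepare", "how", "to", "please", "show", "me",
-- }
--
-- def _query_features(query: str) -> tuple[str, str]:
--     if not query:
--         return "", ""
--
--     def go(tokens):
--         # recursion on the token list: compute the pair for the suffix, then
--         # the head OVERRIDES each slot it qualifies for (head wins = first match)
--         if not tokens:
--             return "", ""
--         head = tokens[0]
--         d, m = go(tokens[1:])
--         if head in DISH_TYPES:
--             d = head
--         if head in MAJOR_INGREDIENTS or (
--             head not in DISH_TYPES and head not in GENERIC_QUERY_TOKENS and len(head) > 2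
--         ):
--             m = head
--         return d, m
--
--     return go(query.split())
-- ===== Notes on version B (the rewrite author's own statement) =====
-- stated objective: alternative
-- what changed: B replaces A's two left-to-right first-match generator scans with one structural recursion that computes the pair for the suffix of the token list and lets the head unconditionally override each slot it qualifies for (head-wins override, no emptiness flags), so first-match semantics emerges from the recursion order.
import Mathlib
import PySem

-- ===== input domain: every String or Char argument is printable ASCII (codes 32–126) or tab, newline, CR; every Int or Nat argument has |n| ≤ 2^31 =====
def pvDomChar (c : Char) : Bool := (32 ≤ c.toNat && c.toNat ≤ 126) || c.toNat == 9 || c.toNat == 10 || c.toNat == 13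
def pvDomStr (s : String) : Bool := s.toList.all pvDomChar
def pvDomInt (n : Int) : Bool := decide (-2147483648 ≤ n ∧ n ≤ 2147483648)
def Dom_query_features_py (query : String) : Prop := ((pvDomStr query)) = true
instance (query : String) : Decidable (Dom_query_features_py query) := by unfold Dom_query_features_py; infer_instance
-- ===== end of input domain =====

-- B replaces A's two first-match scans with one structural recursion over the token list
-- (suffix result, head-wins override); same value everywhere (objective: alternative).

-- module constants (Python set literals; distinct string elements)
def DISH_TYPES : List String := ["dosa", "rice", "sambar", "halwa", "pulao", "bath", "curry", "kheer", "upma"]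
def MAJOR_INGREDIENTS : List String := ["tomato", "spinach", "palak", "carrot", "onion", "potato", "paneer", "chicken", "dal"]
def GENERIC_QUERY_TOKENS : List String := ["recipe", "dish", "food", "bath", "rice", "dosa", "sambar", "halwa", "i", "want", "make", "cook", "prepare", "how", "to", "please", "show", "me"]

-- the two membership conditions, shared verbatim by both Pythons
def isDish (t : String) : Bool := DISH_TYPES.contains t
def isKeyword (t : String) : Bool :=
  MAJOR_INGREDIENTS.contains t ||
    (!DISH_TYPES.contains t && !GENERIC_QUERY_TOKENS.contains t && decide (PySem.Str.len t > 2))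

-- ===== PORT A =====
-- next((x for x in l if p x), "")  =  (l.find? p).getD ""
def query_features_py (query : String) : String × String :=
  if query = "" then ("", "")
  else
    let tokens := (PySem.Str.split₀ query).filter (fun t => t ≠ "")
    let dish_type := (tokens.find? (fun t => isDish t)).getD ""
    let main_keyword := (tokens.find? (fun t => isKeyword t)).getD ""
    (dish_type, main_keyword)

-- ===== PORT B =====
-- recursion on the token list: the pair for the suffix, then the head overrides each slot it qualifies for
def goB : List String → String × String
  | [] => ("", "")
  | head :: rest =>
    let acc := goB rest
    let d := if isDish head then head else acc.1
    let m := if isKeyword head then head else acc.2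
    (d, m)

def query_features_py_alt (query : String) : String × String :=
  if query = "" then ("", "")
  else goB (PySem.Str.split₀ query)

-- ===== PRECONDITION & SPEC =====
def Spec_query_features_py (query : String) (out : String × String) : Prop := out = query_features_py_alt query
instance (query : String) (out : String × String) : Decidable (Spec_query_features_py query out) := by unfold Spec_query_features_py; infer_instance

-- ===== CLAIM =====
def Claim_equal_query_features_py : Prop := ∀ (query : String), Dom_query_features_py query → Spec_query_features_py query (query_features_py query)

-- ===== LEMMAS AND PROOFS =====

-- the empty token satisfies neither condition
theorem isDish_empty : isDish "" = false := by decide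
theorem isKeyword_empty : isKeyword "" = false := by decide

-- filtering out empty tokens does not change the first match of a predicate false on ""
theorem find?_and_ne_empty (p : String → Bool) (hp : p "" = false) (l : List String) :
    l.find? (fun a => !decide (a = "") && p a) = l.find? p := by
  induction l with
  | nil => rfl
  | cons t l ih =>
    by_cases ht : t = ""
    · subst ht; simp [List.find?, hp, ih]
    · simp only [List.find?]
      simp only [ht, decide_false, Bool.not_false, Bool.true_and]
      cases hpt : p t
      · exact ih
      · rfl

-- the head-wins recursion computes the first match of each predicate
theorem goB_eq (l : List String) :
    goB l = ((l.find? (fun t => isDish t)).getD "", (l.find? (fun t => isKeyword t)).getD "") := by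
  induction l with
  | nil => rfl
  | cons t l ih =>
    simp only [goB, ih, List.find?_cons]
    by_cases h1 : isDish t <;> by_cases h2 : isKeyword t <;> simp [h1, h2]

-- ===== VERDICT =====
theorem query_features_py_spec : Claim_equal_query_features_py := by
  intro query _
  show query_features_py query = query_features_py_alt query
  unfold query_features_py query_features_py_alt
  by_cases h : query = ""
  · simp [h]
  · simp only [h, if_false, goB_eq]
    simp [List.find?_filter, find?_and_ne_empty _ isDish_empty, find?_and_ne_empty _ isKeyword_empty]
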